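-- pv_equiv track=rewrite | github.com/AlexThePav/StepikBioInfo | Stepik/1 Finding Hidden Messages/Week 1/FasterFrequentWords.py | PatternToNumber
-- ===== SOURCE A (Python) =====
-- def SymbolToNumber(symbol):
--   x = 0
--   if symbol == "C":
--     x = 1
--   elif symbol == "G":
--     x = 2
--   elif symbol == "T":
--     x = 3
--   return x
--
-- def PatternToNumber(Pattern):
--   l = len(Pattern) - 1
--   if len(Pattern) == 0:
--     return 0
--   patternToList = list(Pattern)
--   symbol = Pattern[l]
--   prefix = Pattern[:l]
--   return 4 * PatternToNumber(prefix) + SymbolToNumber(symbol)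
-- ===== SOURCE B (Python) =====
-- _SYM = {"C": 1, "G": 2, "T": 3}
--
-- def PatternToNumber(Pattern):
--     num = 0
--     for c in Pattern:
--         num = 4 * num + _SYM.get(c, 0)
--     return num
-- ===== Notes on version B (the rewrite author's own statement) =====
-- stated objective: faster
-- what changed: Replaced the recursion that rebuilds the prefix string Pattern[:l] at every level (quadratic string copying) with a single left-to-right pass accumulating num = 4*num + digit via a lookup table.
import Mathlib
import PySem

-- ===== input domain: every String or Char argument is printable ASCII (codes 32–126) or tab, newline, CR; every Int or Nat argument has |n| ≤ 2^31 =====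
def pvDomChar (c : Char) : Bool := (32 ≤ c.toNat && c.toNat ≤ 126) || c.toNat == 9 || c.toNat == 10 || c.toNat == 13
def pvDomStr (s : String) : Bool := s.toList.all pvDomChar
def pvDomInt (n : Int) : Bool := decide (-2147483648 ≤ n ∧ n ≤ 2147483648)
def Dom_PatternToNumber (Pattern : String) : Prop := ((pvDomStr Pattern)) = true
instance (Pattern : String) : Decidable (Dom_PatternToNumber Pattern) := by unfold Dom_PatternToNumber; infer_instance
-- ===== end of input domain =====

-- B replaces A's prefix-copying recursion by one left-to-right accumulating pass (faster: asymptotic, O(n^2) -> O(n)).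

-- ===== PORT A =====
-- SymbolToNumber: x = 0; if "C" then 1 elif "G" then 2 elif "T" then 3
def SymbolToNumberA (symbol : Char) : Int :=
  if symbol = 'C' then 1
  else if symbol = 'G' then 2
  else if symbol = 'T' then 3
  else 0

-- A's recursion, transcribed over the character list of the string:
-- if empty return 0; else 4 * PatternToNumber(Pattern[:l]) + SymbolToNumber(Pattern[l]) with l = len-1.
-- Pattern[:l] = dropLast, Pattern[l] = getLastD (index l = len-1 is in range for a nonempty string; exact).
def patternToNumberA (cs : List Char) : Int :=
  if h : cs = [] then 0
  else 4 * patternToNumberA cs.dropLast + SymbolToNumberA (cs.getLastD 'A')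
termination_by cs.length
decreasing_by
  cases cs with
  | nil => exact absurd rfl h
  | cons a as => simp

def PatternToNumber (Pattern : String) : Int := patternToNumberA Pattern.toList

-- ===== PORT B =====
-- _SYM.get(c, 0) over the literal dict {"C":1,"G":2,"T":3}
def symGetB (c : Char) : Int := PySem.Dict.getD (PySem.Dict.ofList [('C', (1:Int)), ('G', 2), ('T', 3)]) c 0

def PatternToNumber_alt (Pattern : String) : Int :=
  Pattern.toList.foldl (fun num c => 4 * num + symGetB c) 0

-- ===== PRECONDITION & SPEC =====
def Spec_PatternToNumber (Pattern : String) (out : Int) : Prop := out = PatternToNumber_alt Pattern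
instance (Pattern : String) (out : Int) : Decidable (Spec_PatternToNumber Pattern out) := by unfold Spec_PatternToNumber; infer_instance

-- ===== CLAIM (what is proved, stated in full; the proofs are below) =====
def Claim_equal_PatternToNumber : Prop := ∀ (Pattern : String), Dom_PatternToNumber Pattern → Spec_PatternToNumber Pattern (PatternToNumber Pattern)

-- ===== LEMMAS AND PROOFS =====

theorem symGetB_eq (c : Char) : symGetB c = SymbolToNumberA c := by
  simp [symGetB, SymbolToNumberA, PySem.Dict.ofList, PySem.Dict.update, PySem.Dict.getD_insert,
    PySem.Dict.getD_empty]
  split_ifs <;> simp_all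

theorem patternToNumberA_eq_foldl (cs : List Char) :
    patternToNumberA cs = cs.foldl (fun num c => 4 * num + symGetB c) 0 := by
  induction cs using List.reverseRecOn with
  | nil => simp [patternToNumberA]
  | append_singleton xs x ih =>
      rw [patternToNumberA]
      simp [List.foldl_append, ih, symGetB_eq]

-- ===== VERDICT (by name: the statement is the Claim_ definition above) =====
theorem PatternToNumber_spec : Claim_equal_PatternToNumber := by
  intro Pattern _
  unfold Spec_PatternToNumber PatternToNumber PatternToNumber_alt
  exact patternToNumberA_eq_foldl _
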